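-- pv_equiv track=rewrite | github.com/Algorithm-Club-KUAL/TA-Algorithm | KJH/이코테/cos_pro_1급/5_1.py | solution
-- ===== SOURCE A (Python) =====
-- def solution(n):
-- 	answer = 0
-- 	steps = [0 for _ in range(n+1)]
-- 	steps[1] = 1
-- 	steps[2] = 2
-- 	steps[3] = 4
-- 	for i in range(4, n+1):
-- 		steps[i] =  sum(steps[1:i])
-- 	answer = steps[n]
-- 	return answer
-- ===== SOURCE B (Python) =====
-- def solution(n):
--     # closed form: steps[3]=4 and steps[i]=7*2**(i-4) for i>=4
--     return 4 if n == 3 else 7 * 2 ** (n - 4)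
-- ===== Notes on version B (the rewrite author's own statement) =====
-- stated objective: faster
-- what changed: replaced the quadratic loop that re-sums a growing prefix into a DP table with the closed form 7*2^(n-4) (base case 4 for n=3)
import Mathlib
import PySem

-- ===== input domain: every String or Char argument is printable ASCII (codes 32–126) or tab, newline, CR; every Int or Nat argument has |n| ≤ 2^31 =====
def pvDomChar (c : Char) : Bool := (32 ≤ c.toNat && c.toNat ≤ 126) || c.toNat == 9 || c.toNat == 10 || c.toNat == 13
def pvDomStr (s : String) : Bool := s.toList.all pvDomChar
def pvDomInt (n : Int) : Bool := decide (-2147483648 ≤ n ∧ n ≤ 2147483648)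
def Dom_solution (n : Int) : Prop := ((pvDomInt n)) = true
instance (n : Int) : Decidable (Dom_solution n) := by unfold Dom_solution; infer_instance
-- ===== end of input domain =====

-- B replaces A's quadratic table-building loop (steps[i] = sum(steps[1:i])) with the closed form 7*2^(n-4) (4 for n=3): faster.

-- ===== PORT A =====
-- loop body: steps[i] = sum(steps[1:i])
def pvStepA (steps : List Int) (i : Int) : List Int :=
  PySem.List.pySetD steps i (PySem.List.slice steps (some 1) (some i)).sum

def solution (n : Int) : Int :=
  let steps := (PySem.List.pyRange 0 (n+1) 1).map (fun _ => (0 : Int))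
  let steps := PySem.List.pySetD steps 1 1
  let steps := PySem.List.pySetD steps 2 2
  let steps := PySem.List.pySetD steps 3 4
  let steps := (PySem.List.pyRange 4 (n+1) 1).foldl pvStepA steps
  PySem.List.pyGetD steps n 0

-- ===== PORT B =====
def solution_alt (n : Int) : Int :=
  if n = 3 then 4 else 7 * 2 ^ (n - 4).toNat

-- ===== PRECONDITION & SPEC =====
-- A raises IndexError for n < 3 (the table of length n+1 must hold the seed indices 1..3); Pre_ excludes exactly those inputs.
def Pre_solution (n : Int) : Prop := 3 ≤ n
instance (n : Int) : Decidable (Pre_solution n) := by unfold Pre_solution; infer_instance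
def pvWitness_solution : Int := (5)

def Spec_solution (n : Int) (out : Int) : Prop := out = solution_alt n
instance (n : Int) (out : Int) : Decidable (Spec_solution n out) := by unfold Spec_solution; infer_instance

-- ===== CLAIM (what is proved, stated in full; the proofs are below) =====
def Claim_equal_solution : Prop := ∀ (n : Int), Dom_solution n → Pre_solution n → Spec_solution n (solution n)

-- ===== LEMMAS AND PROOFS =====

-- the table A's loop has built once indices 4..j-1 are processed (4 ≤ j ≤ N+1)
def pvTab (N j : Nat) : List Int :=
  [0, 1, 2, 4] ++ (List.range (j - 4)).map (fun k => 7 * 2 ^ k) ++ List.replicate (N + 1 - j) 0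

lemma pv_geom (m : Nat) :
    ((List.range m).map (fun k => (7 : Int) * 2 ^ k)).sum = 7 * 2 ^ m - 7 := by
  induction m with
  | zero => simp
  | succ m ih => simp [List.range_succ, ih]; ring

lemma pv_step (N m : Nat) (h : 4 + m ≤ N) :
    pvStepA (pvTab N (4 + m)) (4 + (m : Int)) = pvTab N (4 + m + 1) := by
  unfold pvStepA
  rw [PySem.List.slice_toNat _ (by omega) (by omega),
      PySem.List.pySetD_of_nonneg _ _ (by omega)]
  rw [show Int.toNat 1 = 1 from rfl, show ((4 : Int) + (m : Int)).toNat = 4 + m by omega]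
  unfold pvTab
  obtain ⟨r, hr⟩ : ∃ r, N + 1 - (4 + m) = r + 1 := ⟨N - 4 - m, by omega⟩
  rw [hr, List.replicate_succ]
  simp only [show 4 + m - 4 = m from by omega, show 4 + m + 1 - 4 = m + 1 from by omega,
             show N + 1 - (4 + m + 1) = r by omega]
  set M := (List.range m).map (fun k => (7 : Int) * 2 ^ k) with hM
  have hlen : M.length = m := by simp [hM]
  have htake : List.take (4 + m - 1) (List.drop 1 ([0,1,2,4] ++ M ++ 0 :: List.replicate r 0))
      = [1,2,4] ++ M := by
    show List.take (4 + m - 1) ([1,2,4] ++ (M ++ 0 :: List.replicate r 0)) = _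
    rw [show 4 + m - 1 = m + 1 + 1 + 1 by omega]
    simp [List.take_succ_cons, List.take_left' hlen]
  rw [htake]
  have hsum : ([1,2,4] ++ M).sum = 7 * 2 ^ m := by
    rw [List.sum_append, hM, pv_geom]; norm_num
  rw [hsum]
  have hset : ([0,1,2,4] ++ (M ++ 0 :: List.replicate r 0)).set (4 + m) (7 * 2 ^ m)
      = [0,1,2,4] ++ (M ++ 7 * 2 ^ m :: List.replicate r 0) := by
    show ((0:Int)::1::2::4::(M ++ 0 :: List.replicate r 0)).set (4 + m) (7 * 2 ^ m) = _
    rw [show 4 + m = m + 1 + 1 + 1 + 1 by omega]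
    simp only [List.set_cons_succ]
    rw [← hlen]
    simp
  rw [List.append_assoc, hset, List.range_succ, List.map_append, ← hM]
  simp

lemma pv_init (N : Nat) (h : 3 ≤ N) :
    ((((List.replicate (N + 1) (0 : Int)).set 1 1).set 2 2).set 3 4) = pvTab N 4 := by
  obtain ⟨k, rfl⟩ : ∃ k, N = k + 3 := ⟨N - 3, by omega⟩
  rw [show k + 3 + 1 = 4 + k by omega, List.replicate_add]
  simp [pvTab]

lemma pv_fold (N m : Nat) (h : 4 + m ≤ N + 1) :
    (PySem.List.pyRange 4 (4 + (m : Int)) 1).foldl pvStepA (pvTab N 4) = pvTab N (4 + m) := by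
  induction m with
  | zero => rw [show (4 : Int) + ((0:Nat):Int) = 4 by norm_num,
                PySem.List.pyRange_one_eq_nil (by omega)]; rfl
  | succ m ih =>
    rw [show ((4:Int) + (((m+1) : Nat) : Int)) = (4 + (m : Int)) + 1 by push_cast; ring,
        PySem.List.pyRange_one_succ_right (by omega), List.foldl_append, ih (by omega)]
    simp only [List.foldl]
    exact pv_step N m (by omega)

theorem pv_main (N : Nat) (h : 3 ≤ N) : solution (N : Int) = solution_alt (N : Int) := by
  unfold solution
  simp only []
  have hinit : (PySem.List.pyRange 0 ((N:Int)+1) 1).map (fun _ => (0 : Int))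
      = List.replicate (N + 1) 0 := by
    rw [List.map_const']
    congr 1
    rw [PySem.List.length_pyRange_one]
    omega
  rw [hinit,
      PySem.List.pySetD_of_nonneg _ _ (by omega), PySem.List.pySetD_of_nonneg _ _ (by omega),
      PySem.List.pySetD_of_nonneg _ _ (by omega)]
  rw [show Int.toNat 1 = 1 from rfl, show Int.toNat 2 = 2 from rfl, show Int.toNat 3 = 3 from rfl]
  rw [pv_init N h]
  rw [show ((N:Int)+1) = 4 + (((N-3 : Nat)) : Int) by omega, pv_fold N (N-3) (by omega)]
  rw [show 4 + (N - 3) = N + 1 by omega]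
  unfold pvTab solution_alt
  rw [show N + 1 - (N + 1) = 0 by omega, show N + 1 - 4 = N - 3 by omega]
  simp only [List.replicate_zero, List.append_nil, PySem.List.pyGetD_natCast]
  by_cases h3 : N = 3
  · subst h3; norm_num
  · rw [if_neg (by exact_mod_cast h3)]
    rw [show ((N:Int) - 4).toNat = N - 4 by omega]
    rw [List.getD_eq_getElem _ _ (by simp; omega)]
    rw [List.getElem_append_right (by simp; omega)]
    simp only [List.length_cons, List.length_nil, List.getElem_map, List.getElem_range]

-- ===== VERDICT (by name: the statement is the Claim_ definition above) =====
theorem solution_spec : Claim_equal_solution := by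
  intro n _ hpre
  show solution n = solution_alt n
  unfold Pre_solution at hpre
  obtain ⟨N, rfl⟩ : ∃ N : Nat, n = (N : Int) := ⟨n.toNat, by omega⟩
  exact pv_main N (by exact_mod_cast hpre)
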